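-- pv_equiv track=rewrite | github.com/GringoBandito/Coding-Challenges | 143/word_processing.py | get_most_common_start
-- ===== SOURCE A (Python) =====
-- def get_most_common_start(words):
--     """Takes list of words and returns string of most common starting letter"""
--     assert isinstance(words, list) and len(words) > 0
--     for i in words:
--         assert isinstance(i,str) and len(i) > 0 and i.isalpha()
--
--     d = dict()
--     s = 'abcdefghijklmnopqrstuvwxyz'
--     top = 0
--     char = ''
--
--     for i in s:
--         d[i] = 0
--
--     for j in words:
--         letter = j[0]
--         d[letter] += 1
--
--     for key in d:
--         if d[key] > top:
--             char = key
--             top = d[key]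
--
--     return char
-- ===== SOURCE B (Python) =====
-- def get_most_common_start(words):
--     """Takes list of words and returns string of most common starting letter"""
--     assert isinstance(words, list) and len(words) > 0
--     for i in words:
--         assert isinstance(i, str) and len(i) > 0 and i.isalpha()
--
--     firsts = sorted(w[0] for w in words)
--     best_char = ''
--     best = 0
--     cur = None
--     run = 0
--     for c in firsts:
--         if c == cur:
--             run += 1
--         else:
--             cur = c
--             run = 1
--         if run > best:
--             best = run
--             best_char = c
--     return best_char
-- ===== Notes on version B (the rewrite author's own statement) =====
-- stated objective: alternative
-- what changed: Replaces the 26-key dict initialisation + counting + key scan with a sort of the first letters followed by a single run-length sweep (strict '>' on an ascending sort reproduces A's smallest-letter tie-break).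
import Mathlib
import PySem

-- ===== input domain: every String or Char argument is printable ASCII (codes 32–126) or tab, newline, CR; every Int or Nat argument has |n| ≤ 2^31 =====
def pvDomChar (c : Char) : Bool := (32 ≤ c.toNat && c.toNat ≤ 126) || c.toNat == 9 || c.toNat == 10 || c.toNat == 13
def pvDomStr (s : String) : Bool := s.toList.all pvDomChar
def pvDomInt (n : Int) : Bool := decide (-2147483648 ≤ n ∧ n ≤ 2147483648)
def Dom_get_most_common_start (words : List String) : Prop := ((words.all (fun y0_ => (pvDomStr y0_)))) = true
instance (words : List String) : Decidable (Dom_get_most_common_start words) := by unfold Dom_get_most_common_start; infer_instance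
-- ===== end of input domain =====

-- B replaces A's 26-key dict (init + count + alphabetical key scan) by sorting the first
-- letters and sweeping runs (ascending sort + strict '>' keeps A's smallest-letter tie-break);
-- an alternative decomposition, not claimed faster.

-- ===== PORT A =====
-- d[letter] += 1 : KeyError (letter not a lowercase key) leaves d unchanged here; Pre_ excludes it.
def aCountStep (d : PySem.Dict Char Int) (j : String) : PySem.Dict Char Int :=
  match PySem.Str.pyGet? j 0 with
  | some letter =>
    match d.get? letter with
    | some v => d.insert letter (v + 1)
    | none => d
  | none => d

-- the final loop's state (char, top), updated on d[key] > top
def aBestStep (p : String × Int) (kv : Char × Int) : String × Int :=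
  if kv.2 > p.2 then (String.ofList [kv.1], kv.2) else p

def get_most_common_start (words : List String) : String :=
  let s := "abcdefghijklmnopqrstuvwxyz"
  let d0 := s.toList.foldl (fun d i => d.insert i (0 : Int)) PySem.Dict.empty
  let d := words.foldl aCountStep d0
  (d.items.foldl aBestStep ("", 0)).1

-- ===== PORT B =====
-- one sweep step over the sorted first letters: state (best_char, best, cur, run)
def bStep (st : String × Int × Option Char × Int) (c : Char) : String × Int × Option Char × Int :=
  let run : Int := if st.2.2.1 = some c then st.2.2.2 + 1 else 1
  if run > st.2.1 then (String.ofList [c], run, some c, run) else (st.1, st.2.1, some c, run)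

def get_most_common_start_alt (words : List String) : String :=
  let firsts := PySem.List.sorted
    (words.map (fun w => match PySem.Str.pyGet? w 0 with | some c => c | none => ' '))
    (fun x => x) false
  (firsts.foldl bStep ("", (0 : Int), (none : Option Char), (0 : Int))).1

-- ===== PRECONDITION & SPEC =====
-- Pre_ is exactly where A returns: the asserts pass (non-empty list of non-empty alphabetic
-- words) and every first letter is lowercase (an uppercase first letter is a KeyError in A).
def Pre_get_most_common_start (words : List String) : Prop :=
  words ≠ [] ∧ ∀ w ∈ words, w.toList ≠ [] ∧ PySem.Str.strIsalpha w = true ∧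
    w.toList.headI ∈ "abcdefghijklmnopqrstuvwxyz".toList
instance (words : List String) : Decidable (Pre_get_most_common_start words) := by
  unfold Pre_get_most_common_start; infer_instance

def pvWitness_get_most_common_start : List String := ["apple", "ant", "bee"]

def Spec_get_most_common_start (words : List String) (out : String) : Prop :=
  out = get_most_common_start_alt words
instance (words : List String) (out : String) : Decidable (Spec_get_most_common_start words out) := by
  unfold Spec_get_most_common_start; infer_instance

-- ===== CLAIM (what is proved, stated in full; the proofs are below) =====
def Claim_equal_get_most_common_start : Prop :=
  ∀ (words : List String), Dom_get_most_common_start words →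
    Pre_get_most_common_start words →
    Spec_get_most_common_start words (get_most_common_start words)

-- ===== LEMMAS AND PROOFS =====

def azL : List Char := "abcdefghijklmnopqrstuvwxyz".toList

def firstChar (w : String) : Char := w.toList.headI

lemma pyGet?_first (w : String) (h : w.toList ≠ []) :
    PySem.Str.pyGet? w 0 = some (firstChar w) := by
  cases hc : w.toList with
  | nil => exact absurd hc h
  | cons a t => simp [pysem, firstChar, hc]

lemma first_of_nonempty (w : String) (h : w.toList ≠ []) :
    (match PySem.Str.pyGet? w 0 with | some c => c | none => ' ') = firstChar w := by
  rw [pyGet?_first w h]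

lemma init_items :
    (azL.foldl (fun d i => d.insert i (0 : Int)) PySem.Dict.empty).items
      = azL.map (fun l => (l, (0 : Int))) := by
  have := PySem.Dict.items_foldl_insert_fresh azL (fun l => l) (fun _ => (0 : Int))
    PySem.Dict.empty (by intro a _; simp [pysem]) (by simpa using (by decide : azL.Nodup))
  simpa using this

lemma count_fold (ws : List String) :
    ∀ (g : Char → Int) (d : PySem.Dict Char Int),
      d.items = azL.map (fun l => (l, g l)) →
      (∀ w ∈ ws, w.toList ≠ [] ∧ firstChar w ∈ azL) →
      (ws.foldl aCountStep d).items
        = azL.map (fun l => (l, g l + ((ws.map firstChar).count l : Int))) := by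
  induction ws with
  | nil => intro g d hd _; simpa using hd
  | cons w ws ih =>
    intro g d hd hws
    obtain ⟨hne, hmem⟩ := hws w (by simp)
    have hkeys : d.keys = azL := by
      simp [PySem.Dict.keys, hd, Function.comp_def]
    have hnd : d.keys.Nodup := by rw [hkeys]; decide
    have hget : d.get? (firstChar w) = some (g (firstChar w)) := by
      apply PySem.Dict.get?_of_mem_items
      · rw [hd]; exact List.mem_map.2 ⟨firstChar w, hmem, rfl⟩
      · exact hnd
    have hstep : aCountStep d w = d.insert (firstChar w) (g (firstChar w) + 1) := by
      unfold aCountStep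
      rw [pyGet?_first w hne]
      simp [hget]
    have hcont : d.contains (firstChar w) = true := by
      rw [PySem.Dict.contains_eq_isSome_get?, hget]; rfl
    have hitems : (d.insert (firstChar w) (g (firstChar w) + 1)).items
        = azL.map (fun l => (l, if l = firstChar w then g l + 1 else g l)) := by
      rw [PySem.Dict.items_insert_of_contains d _ hcont, hd, List.map_map]
      apply List.map_congr_left
      intro l _
      by_cases hl : l = firstChar w
      · subst hl; simp
      · simp [hl]
    rw [List.foldl_cons, hstep,
      ih (fun l => if l = firstChar w then g l + 1 else g l) _ hitems
        (fun w' hw' => hws w' (by simp [hw']))]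
    apply List.map_congr_left
    intro l _
    by_cases hl : l = firstChar w
    · subst hl; simp; omega
    · simp only [List.map_cons, List.count_cons, hl]
      have : ¬ (firstChar w == l) = true := by simpa using fun h => hl h.symm
      simp [this]

lemma pick_none (f : Char → Int) (L : List Char) (h : ∀ l ∈ L, f l ≤ 0) :
    L.foldl (fun p l => aBestStep p (l, f l)) ("", 0) = ("", 0) := by
  induction L with
  | nil => rfl
  | cons a t ih =>
    have ha : ¬ f a > (0 : Int) := by have := h a (by simp); omega
    rw [List.foldl_cons]
    have hstep : aBestStep ("", 0) (a, f a) = ("", 0) := by simp [aBestStep, ha]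
    rw [hstep]
    exact ih (fun l hl => h l (by simp [hl]))

lemma pick_spec (f : Char → Int) (L : List Char) (hpw : L.Pairwise (· < ·))
    (hex : ∃ l ∈ L, 0 < f l) :
    ∃ m ∈ L, L.foldl (fun p l => aBestStep p (l, f l)) ("", 0) = (String.ofList [m], f m) ∧
      0 < f m ∧ (∀ x ∈ L, f x ≤ f m) ∧ (∀ x ∈ L, f x = f m → m ≤ x) := by
  induction L using List.reverseRecOn with
  | nil => simp at hex
  | append_singleton L c ih =>
    rw [List.pairwise_append] at hpw
    obtain ⟨hpwL, -, hub⟩ := hpw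
    have hub : ∀ x ∈ L, x < c := fun x hx => hub x hx c (by simp)
    rw [List.foldl_append]
    by_cases hexL : ∃ l ∈ L, 0 < f l
    · obtain ⟨m, hmL, heq, hpos, hmax, hleast⟩ := ih hpwL hexL
      rw [heq]
      by_cases hc : f c > f m
      · refine ⟨c, by simp, ?_, by omega, ?_, ?_⟩
        · simp [aBestStep, hc]
        · intro x hx
          rcases (List.mem_append.1 hx) with hx | hx
          · have := hmax x hx; omega
          · simp at hx; subst hx; exact le_refl _
        · intro x hx hfx
          rcases (List.mem_append.1 hx) with hx | hx
          · have := hmax x hx; omega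
          · simp at hx; subst hx; exact le_refl _
      · refine ⟨m, by simp [hmL], ?_, hpos, ?_, ?_⟩
        · simp [aBestStep, hc]
        · intro x hx
          rcases (List.mem_append.1 hx) with hx | hx
          · exact hmax x hx
          · simp at hx; subst hx; omega
        · intro x hx hfx
          rcases (List.mem_append.1 hx) with hx | hx
          · exact hleast x hx hfx
          · simp at hx; subst hx; exact le_of_lt (hub m hmL)
    · push Not at hexL
      have hfc : 0 < f c := by
        obtain ⟨l, hl, hfl⟩ := hex
        rcases List.mem_append.1 hl with h | h
        · have := hexL l h; omega
        · simp at h; subst h; exact hfl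
      rw [pick_none f L hexL]
      refine ⟨c, by simp, ?_, hfc, ?_, ?_⟩
      · simp [aBestStep, hfc]
      · intro x hx
        rcases List.mem_append.1 hx with h | h
        · have := hexL x h; omega
        · simp at h; subst h; exact le_refl _
      · intro x hx hfx
        rcases List.mem_append.1 hx with h | h
        · have := hexL x h; omega
        · simp at h; subst h; exact le_refl _

lemma sweep_spec (s : List Char) (hpw : s.Pairwise (· ≤ ·)) (hne : s ≠ []) :
    ∃ m last, s.foldl bStep ("", (0 : Int), (none : Option Char), (0 : Int))
        = (String.ofList [m], (s.count m : Int), some last, (s.count last : Int)) ∧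
      m ∈ s ∧ last ∈ s ∧ (∀ x ∈ s, x ≤ last) ∧
      (∀ x, s.count x ≤ s.count m) ∧ (∀ x, s.count x = s.count m → m ≤ x) := by
  induction s using List.reverseRecOn with
  | nil => exact absurd rfl hne
  | append_singleton s c ih =>
    rw [List.pairwise_append] at hpw
    obtain ⟨hpws, -, hub⟩ := hpw
    have hub : ∀ x ∈ s, x ≤ c := fun x hx => hub x hx c (by simp)
    rw [List.foldl_append]
    rcases eq_or_ne s [] with hs | hs
    · subst hs
      refine ⟨c, c, ?_, by simp, by simp, by simp, ?_, ?_⟩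
      · simp [bStep]
      · intro x
        by_cases hx : x = c
        · subst hx; exact le_refl _
        · simp [Ne.symm hx]
      · intro x hx
        by_cases h : x = c
        · exact le_of_eq h.symm
        · simp [Ne.symm h] at hx
    · obtain ⟨m, last, hst, hm, hlast, hlub, hmax, hleast⟩ := ih hpws hs
      rw [hst]
      have hcountc : ((s ++ [c]).count c) = s.count c + 1 := by simp
      have hcount_ne : ∀ x, x ≠ c → (s ++ [c]).count x = s.count x := by
        intro x hx; simp [List.count_append, Ne.symm hx]
      have hrun : (if some last = some c then (s.count last : Int) + 1 else 1)
          = ((s ++ [c]).count c : Int) := by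
        by_cases hlc : last = c
        · subst hlc; simp [hcountc]
        · have hcnot : c ∉ s := by
            intro hcs
            exact hlc (le_antisymm (hlub c hcs) (hub last hlast)).symm
          simp [hlc, List.count_append, List.count_eq_zero.2 hcnot]
      by_cases hbr : ((s ++ [c]).count c : Int) > (s.count m : Int)
      · refine ⟨c, c, ?_, by simp, by simp, ?_, ?_, ?_⟩
        · show bStep _ c = _
          unfold bStep
          rw [hrun]
          rw [if_pos hbr]
        · intro x hx
          rcases List.mem_append.1 hx with h | h
          · exact hub x h
          · simp at h; subst h; exact le_refl _
        · intro x
          by_cases hx : x = c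
          · subst hx; exact le_refl _
          · rw [hcount_ne x hx]
            have := hmax x; omega
        · intro x hx
          by_cases hxc : x = c
          · subst hxc; exact le_refl _
          · rw [hcount_ne x hxc] at hx
            have := hmax x; omega
      · have hmc : m ≠ c := by
          intro h; subst h
          rw [hcountc] at hbr; push_cast at hbr; omega
        refine ⟨m, c, ?_, by simp [hm], by simp, ?_, ?_, ?_⟩
        · show bStep _ c = _
          unfold bStep
          rw [hrun]
          rw [if_neg hbr, hcount_ne m hmc]
        · intro x hx
          rcases List.mem_append.1 hx with h | h
          · exact hub x h
          · simp at h; subst h; exact le_refl _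
        · intro x
          rw [hcount_ne m hmc]
          by_cases hx : x = c
          · subst hx; omega
          · rw [hcount_ne x hx]; exact hmax x
        · intro x hx
          rw [hcount_ne m hmc] at hx
          by_cases hxc : x = c
          · subst hxc; exact hub m hm
          · rw [hcount_ne x hxc] at hx
            exact hleast x hx

-- ===== VERDICT (by name: the statement is the Claim_ definition above) =====
theorem get_most_common_start_spec : Claim_equal_get_most_common_start := by
  intro words _ hpre
  unfold Spec_get_most_common_start
  obtain ⟨hwne, hall⟩ := hpre
  have hforall : ∀ w ∈ words, w.toList ≠ [] ∧ firstChar w ∈ azL :=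
    fun w hw => ⟨(hall w hw).1, (hall w hw).2.2⟩
  have hmapeq : words.map (fun w => match PySem.Str.pyGet? w 0 with | some c => c | none => ' ')
      = words.map firstChar :=
    List.map_congr_left (fun w hw => first_of_nonempty w (hall w hw).1)
  -- A's value is the best-letter fold over the alphabet with the first-letter counts
  have hA : get_most_common_start words
      = (azL.foldl (fun p l => aBestStep p (l, ((words.map firstChar).count l : Int))) ("", 0)).1 := by
    show ((words.foldl aCountStep
        (azL.foldl (fun d i => d.insert i (0 : Int)) PySem.Dict.empty)).items.foldl
        aBestStep ("", (0 : Int))).1 = _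
    rw [count_fold words (fun _ => (0 : Int)) _ init_items hforall, List.foldl_map]
    simp only [zero_add]
  have hB : get_most_common_start_alt words
      = ((PySem.List.sorted (words.map firstChar) (fun x => x) false).foldl bStep
          ("", (0 : Int), (none : Option Char), (0 : Int))).1 := by
    show ((PySem.List.sorted
        (words.map (fun w => match PySem.Str.pyGet? w 0 with | some c => c | none => ' '))
        (fun x => x) false).foldl bStep ("", (0 : Int), (none : Option Char), (0 : Int))).1 = _
    rw [hmapeq]
  -- the A side via pick_spec
  have hex : ∃ l ∈ azL, 0 < ((words.map firstChar).count l : Int) := by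
    cases words with
    | nil => exact absurd rfl hwne
    | cons w ws =>
      refine ⟨firstChar w, (hforall w (by simp)).2, ?_⟩
      have : 0 < (List.map firstChar (w :: ws)).count (firstChar w) :=
        List.count_pos_iff.2 (by simp)
      exact_mod_cast this
  obtain ⟨mA, hmA_az, hApick, hApos, hAmax, hAleast⟩ :=
    pick_spec (fun l => ((words.map firstChar).count l : Int)) azL (by decide) hex
  -- the B side via sweep_spec
  have hsne : PySem.List.sorted (words.map firstChar) (fun x => x) false ≠ [] := by
    rw [Ne, PySem.List.sorted_eq_nil_iff]
    cases words with
    | nil => exact absurd rfl hwne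
    | cons w ws => simp
  obtain ⟨mB, lastB, hBsweep, hmB_mem, -, -, hBmax, hBleast⟩ :=
    sweep_spec (PySem.List.sorted (words.map firstChar) (fun x => x) false)
      (PySem.List.sorted_pairwise _ _) hsne
  have hscount : ∀ x, (PySem.List.sorted (words.map firstChar) (fun x => x) false).count x
      = (words.map firstChar).count x :=
    fun x => (PySem.List.sorted_perm (words.map firstChar) (fun x => x) false).count_eq x
  -- the two selected letters coincide
  have hmB_az : mB ∈ azL := by
    have : mB ∈ words.map firstChar := ((PySem.List.sorted_perm _ _ _).mem_iff).1 hmB_mem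
    obtain ⟨w, hw, hwe⟩ := List.mem_map.1 this
    exact hwe ▸ (hforall w hw).2
  have hcnt_eq : (words.map firstChar).count mA = (words.map firstChar).count mB := by
    have h1 : (words.map firstChar).count mB ≤ (words.map firstChar).count mA := by
      have := hAmax mB hmB_az; exact_mod_cast this
    have h2 : (words.map firstChar).count mA ≤ (words.map firstChar).count mB := by
      have := hBmax mA; rw [hscount, hscount] at this; exact this
    omega
  have hmm : mA = mB := by
    have h1 : mA ≤ mB := hAleast mB hmB_az (by exact_mod_cast hcnt_eq.symm)
    have h2 : mB ≤ mA := by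
      apply hBleast mA
      rw [hscount, hscount]
      exact hcnt_eq
    exact le_antisymm h1 h2
  rw [hA, hB, hApick, hBsweep, hmm]
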